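-- pv_equiv track=rewrite | github.com/MIRIDIH-2023/UDOP | core/datasets/miridih.py | group_bbox
-- ===== SOURCE A (Python) =====
-- from typing import List, Tuple
--
-- def group_bbox(bbox_lst, group_lst) -> List[List[int]]:
--     """
--     Group bounding boxes of masked tokens into chunks of continuous tokens.
--     Args:
--         bbox_lst (`List[List[int, int, int, int]]`): List of bounding boxes
--         group_lst (`List[List[int, int]]`): List of slices of continuous tokens
--
--     Returns:
--         bbox_group_lst (`List[List[int, int, int, int]]`): List of grouped bounding boxes
--
--     """
--     bbox_group_lst = []
--
--     for s in group_lst: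
--         target = bbox_lst[s[0] : s[1]]
--         if len(target) == 1:
--             bbox_group_lst.append(*target)
--         else:
--             l = target[0][0]
--             t = target[0][1]
--             r = target[0][2]
--             b = target[0][3]
--             for i in target[1:]:
--                 if i[0] < l:
--                     l = i[0]
--                 if i[1] < t:
--                     t = i[1]
--                 if i[2] > r:
--                     r = i[2]
--                 if i[3] > b:
--                     b = i[3]
--             bbox_group_lst.append([l, t, r, b])
--
--     return bbox_group_lst
-- ===== SOURCE B (Python) =====
-- def group_bbox(bbox_lst, group_lst):
--     """Columnar re-implementation: transpose each slice and take per-column min/max."""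
--     bbox_group_lst = []
--     for s in group_lst:
--         target = bbox_lst[s[0]:s[1]]
--         if len(target) == 1:
--             bbox_group_lst.append(target[0])
--         else:
--             cols = list(zip(*target))
--             bbox_group_lst.append([min(cols[0]), min(cols[1]), max(cols[2]), max(cols[3])])
--     return bbox_group_lst
-- ===== Notes on version B (the rewrite author's own statement) =====
-- stated objective: simpler
-- what changed: Replaces A's interleaved four-variable running-comparison loop over the slice with a transpose (zip(*target)) followed by four independent columnar min/max aggregations.
import Mathlib
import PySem

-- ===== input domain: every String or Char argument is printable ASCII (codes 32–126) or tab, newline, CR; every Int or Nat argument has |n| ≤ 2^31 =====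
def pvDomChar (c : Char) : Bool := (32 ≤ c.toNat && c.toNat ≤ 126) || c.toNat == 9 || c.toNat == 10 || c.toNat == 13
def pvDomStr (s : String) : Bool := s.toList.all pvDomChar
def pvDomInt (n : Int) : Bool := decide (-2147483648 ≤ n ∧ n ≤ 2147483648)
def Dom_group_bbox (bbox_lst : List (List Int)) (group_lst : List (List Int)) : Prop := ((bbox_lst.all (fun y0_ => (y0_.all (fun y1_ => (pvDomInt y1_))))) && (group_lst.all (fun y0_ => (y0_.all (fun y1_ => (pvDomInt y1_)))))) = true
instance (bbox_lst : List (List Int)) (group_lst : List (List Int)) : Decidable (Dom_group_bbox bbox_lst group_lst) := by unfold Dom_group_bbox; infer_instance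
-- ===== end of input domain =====

-- B replaces A's interleaved four-variable running min/max loop by a transpose plus four
-- independent columnar min/max aggregations (objective: simpler).

-- ===== PORT A =====
-- A's inner loop body: running l/t/r/b update; Option threads Python's IndexErrors (none = raise).
def groupBboxInnerA (st? : Option (Int × Int × Int × Int)) (i : List Int) :
    Option (Int × Int × Int × Int) :=
  st?.bind fun st =>
  (PySem.List.pyGet? i 0).bind fun i0 =>
  (PySem.List.pyGet? i 1).bind fun i1 =>
  (PySem.List.pyGet? i 2).bind fun i2 =>
  (PySem.List.pyGet? i 3).map fun i3 =>
    (if i0 < st.1 then i0 else st.1,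
     if i1 < st.2.1 then i1 else st.2.1,
     if st.2.2.1 < i2 then i2 else st.2.2.1,
     if st.2.2.2 < i3 then i3 else st.2.2.2)

-- One iteration of A's outer loop.
def groupBboxStepA (bbox_lst : List (List Int)) (acc? : Option (List (List Int)))
    (s : List Int) : Option (List (List Int)) :=
  acc?.bind fun acc =>
  (PySem.List.pyGet? s 0).bind fun s0 =>
  (PySem.List.pyGet? s 1).bind fun s1 =>
  let target := PySem.List.slice bbox_lst (some s0) (some s1)
  if target.length = 1 then
    (PySem.List.pyGet? target 0).map fun t0 => acc ++ [t0]
  else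
    (PySem.List.pyGet? target 0).bind fun t0 =>
    (PySem.List.pyGet? t0 0).bind fun l0 =>
    (PySem.List.pyGet? t0 1).bind fun tv0 =>
    (PySem.List.pyGet? t0 2).bind fun r0 =>
    (PySem.List.pyGet? t0 3).bind fun b0 =>
    ((PySem.List.slice target (some 1) none).foldl groupBboxInnerA
        (some (l0, tv0, r0, b0))).map fun st =>
      acc ++ [[st.1, st.2.1, st.2.2.1, st.2.2.2]]

def group_bbox (bbox_lst : List (List Int)) (group_lst : List (List Int)) : List (List Int) :=
  (group_lst.foldl (groupBboxStepA bbox_lst) (some [])).getD []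

-- ===== PORT B =====
-- Hand port of list(zip(*target)): column j for each j below the minimum row length;
-- exact because getD is only read at j < every row's length.
def groupBboxZipStar (tss : List (List Int)) : List (List Int) :=
  match tss with
  | [] => []
  | t :: ts =>
    let n := ts.foldl (fun m u => min m u.length) t.length
    (List.range n).map (fun j => (t :: ts).map (fun b => b.getD j 0))

def groupBboxStepB (bbox_lst : List (List Int)) (acc? : Option (List (List Int)))
    (s : List Int) : Option (List (List Int)) :=
  acc?.bind fun acc =>
  (PySem.List.pyGet? s 0).bind fun s0 =>
  (PySem.List.pyGet? s 1).bind fun s1 =>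
  let target := PySem.List.slice bbox_lst (some s0) (some s1)
  if target.length = 1 then
    (PySem.List.pyGet? target 0).map fun t0 => acc ++ [t0]
  else
    let cols := groupBboxZipStar target
    (PySem.List.pyGet? cols 0).bind fun c0 =>
    (PySem.List.pyGet? cols 1).bind fun c1 =>
    (PySem.List.pyGet? cols 2).bind fun c2 =>
    (PySem.List.pyGet? cols 3).bind fun c3 =>
    (PySem.List.min? c0 (fun y => y)).bind fun m0 =>
    (PySem.List.min? c1 (fun y => y)).bind fun m1 =>
    (PySem.List.max? c2 (fun y => y)).bind fun m2 =>
    (PySem.List.max? c3 (fun y => y)).map fun m3 =>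
      acc ++ [[m0, m1, m2, m3]]

def group_bbox_alt (bbox_lst : List (List Int)) (group_lst : List (List Int)) : List (List Int) :=
  (group_lst.foldl (groupBboxStepB bbox_lst) (some [])).getD []

-- ===== PRECONDITION & SPEC =====
-- Pre_ excludes exactly the inputs on which A raises IndexError: a group entry shorter than 2,
-- an empty slice, or a multi-box slice containing a box with fewer than 4 coordinates.
def Pre_group_bbox (bbox_lst : List (List Int)) (group_lst : List (List Int)) : Prop :=
  ∀ s ∈ group_lst, 2 ≤ s.length ∧
    (PySem.List.slice bbox_lst (PySem.List.pyGet? s 0) (PySem.List.pyGet? s 1) ≠ [] ∧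
     ((PySem.List.slice bbox_lst (PySem.List.pyGet? s 0) (PySem.List.pyGet? s 1)).length = 1 ∨
      ∀ b ∈ PySem.List.slice bbox_lst (PySem.List.pyGet? s 0) (PySem.List.pyGet? s 1), 4 ≤ b.length))
instance (bbox_lst : List (List Int)) (group_lst : List (List Int)) : Decidable (Pre_group_bbox bbox_lst group_lst) := by unfold Pre_group_bbox; infer_instance

def pvWitness_group_bbox : List (List Int) × List (List Int) :=
  ([[1, 2, 3, 4], [0, 5, 9, 1], [7, 7, 7, 7]], [[0, 2], [2, 3]])

def Spec_group_bbox (bbox_lst : List (List Int)) (group_lst : List (List Int)) (out : List (List Int)) : Prop := out = group_bbox_alt bbox_lst group_lst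
instance (bbox_lst : List (List Int)) (group_lst : List (List Int)) (out : List (List Int)) : Decidable (Spec_group_bbox bbox_lst group_lst out) := by unfold Spec_group_bbox; infer_instance

-- ===== CLAIM (what is proved, stated in full; the proofs are below) =====
def Claim_equal_group_bbox : Prop := ∀ (bbox_lst : List (List Int)) (group_lst : List (List Int)), Dom_group_bbox bbox_lst group_lst → Pre_group_bbox bbox_lst group_lst → Spec_group_bbox bbox_lst group_lst (group_bbox bbox_lst group_lst)

-- ===== LEMMAS AND PROOFS =====

lemma pvGet4_0 {α} (a b c d : α) (u : List α) : PySem.List.pyGet? (a::b::c::d::u) 0 = some a := by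
  simp [pysem]
lemma pvGet4_1 {α} (a b c d : α) (u : List α) : PySem.List.pyGet? (a::b::c::d::u) 1 = some b := by
  simp [pysem]
lemma pvGet4_2 {α} (a b c d : α) (u : List α) : PySem.List.pyGet? (a::b::c::d::u) 2 = some c := by
  simp [pysem]
lemma pvGet4_3 {α} (a b c d : α) (u : List α) : PySem.List.pyGet? (a::b::c::d::u) 3 = some d := by
  simp [pysem]
lemma pvGet2_0 {α} (x y : α) (u : List α) : PySem.List.pyGet? (x::y::u) 0 = some x := by
  simp [pysem]
lemma pvGet2_1 {α} (x y : α) (u : List α) : PySem.List.pyGet? (x::y::u) 1 = some y := by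
  simp [pysem]

lemma pvExists_cons4 {α} (i : List α) (h : 4 ≤ i.length) :
    ∃ a b c d u, i = a::b::c::d::u := by
  rcases i with _ | ⟨a, _ | ⟨b, _ | ⟨c, _ | ⟨d, u⟩⟩⟩⟩ <;>
    first
      | exact ⟨a, b, c, d, u, rfl⟩
      | (simp at h)

-- A's inner Option fold computes the four independent columnar folds.
lemma pvFoldA (rest : List (List Int)) (h : ∀ i ∈ rest, 4 ≤ i.length)
    (st : Int × Int × Int × Int) :
    rest.foldl groupBboxInnerA (some st) = some
      (rest.foldl (fun l i => min l (i.getD 0 0)) st.1,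
       rest.foldl (fun t i => min t (i.getD 1 0)) st.2.1,
       rest.foldl (fun r i => max r (i.getD 2 0)) st.2.2.1,
       rest.foldl (fun b i => max b (i.getD 3 0)) st.2.2.2) := by
  induction rest generalizing st with
  | nil => rfl
  | cons i rest ih =>
    obtain ⟨a, b, c, d, u, rfl⟩ := pvExists_cons4 i (h i (by simp))
    simp only [List.foldl_cons, groupBboxInnerA, pvGet4_0, pvGet4_1, pvGet4_2, pvGet4_3,
      Option.bind_some, Option.map_some]
    rw [ih (fun j hj => h j (by simp [hj]))]
    have g0 : (a::b::c::d::u).getD 0 0 = a := rfl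
    have g1 : (a::b::c::d::u).getD 1 0 = b := rfl
    have g2 : (a::b::c::d::u).getD 2 0 = c := rfl
    have g3 : (a::b::c::d::u).getD 3 0 = d := rfl
    rw [g0, g1, g2, g3]
    have e1 : (if a < st.1 then a else st.1) = min st.1 a := by omega
    have e2 : (if b < st.2.1 then b else st.2.1) = min st.2.1 b := by omega
    have e3 : (if st.2.2.1 < c then c else st.2.2.1) = max st.2.2.1 c := by omega
    have e4 : (if st.2.2.2 < d then d else st.2.2.2) = max st.2.2.2 d := by omega
    rw [e1, e2, e3, e4]

lemma pvFoldlMin_ge (k : Nat) (rest : List (List Int)) :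
    ∀ start : Nat, k ≤ start → (∀ u ∈ rest, k ≤ u.length) →
      k ≤ rest.foldl (fun m u => min m u.length) start := by
  induction rest with
  | nil => intro start hs _; exact hs
  | cons u rest ih =>
    intro start hs h
    exact ih _ (le_min hs (h u (by simp))) (fun v hv => h v (by simp [hv]))

-- The step functions agree on every group entry admitted by Pre_.
lemma pvStep_eq (bbox : List (List Int)) (s : List Int)
    (h2 : 2 ≤ s.length)
    (hne : PySem.List.slice bbox (PySem.List.pyGet? s 0) (PySem.List.pyGet? s 1) ≠ [])
    (h14 : (PySem.List.slice bbox (PySem.List.pyGet? s 0) (PySem.List.pyGet? s 1)).length = 1 ∨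
      ∀ b ∈ PySem.List.slice bbox (PySem.List.pyGet? s 0) (PySem.List.pyGet? s 1), 4 ≤ b.length)
    (acc? : Option (List (List Int))) :
    groupBboxStepA bbox acc? s = groupBboxStepB bbox acc? s := by
  rcases acc? with _ | acc
  · rfl
  rcases s with _ | ⟨x, _ | ⟨y, s'⟩⟩
  · simp at h2
  · simp at h2
  rw [pvGet2_0, pvGet2_1] at hne h14
  simp only [groupBboxStepA, groupBboxStepB, pvGet2_0, pvGet2_1, Option.bind_some]
  by_cases hlen : (PySem.List.slice bbox (some x) (some y)).length = 1
  · simp only [hlen, if_pos]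
  simp only [hlen, if_neg, not_false_iff]
  rcases h14 with h1 | h4
  · exact absurd h1 hlen
  obtain ⟨t0, rest, htr⟩ := List.exists_cons_of_ne_nil hne
  rw [htr] at h4 ⊢
  obtain ⟨a, b, c, d, u, rfl⟩ := pvExists_cons4 t0 (h4 t0 (by simp))
  have h4r : ∀ i ∈ rest, 4 ≤ i.length := fun i hi => h4 i (by simp [hi])
  -- A side
  rw [PySem.List.slice_from_one]
  simp only [PySem.List.pyGet?_zero_cons, pvGet4_1, pvGet4_2, pvGet4_3,
    Option.bind_some, List.tail_cons]
  rw [pvFoldA rest h4r (a, b, c, d)]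
  -- B side
  simp only [groupBboxZipStar]
  have hn4 : 4 ≤ rest.foldl (fun m v => min m v.length) (a::b::c::d::u).length :=
    pvFoldlMin_ge 4 rest _ (by simp) h4r
  set n := rest.foldl (fun m v => min m v.length) (a::b::c::d::u).length with hn
  have hsplit : List.range n = [0, 1, 2, 3] ++ (List.range (n - 4)).map (4 + ·) := by
    have h44 : n = 4 + (n - 4) := by omega
    conv_lhs => rw [h44, List.range_add]
    rfl
  rw [hsplit, List.map_append]
  simp only [List.map_cons, List.map_nil, List.cons_append, List.nil_append,
    pvGet4_0, pvGet4_1, pvGet4_2, pvGet4_3, Option.bind_some,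
    PySem.List.min?_id_cons, PySem.List.max?_id_cons, Option.map_some]
  simp only [List.foldl_map, List.getD]
  rfl

-- ===== VERDICT (by name: the statement is the Claim_ definition above) =====
theorem group_bbox_spec : Claim_equal_group_bbox := by
  intro bbox group _ hpre
  unfold Spec_group_bbox group_bbox group_bbox_alt
  have hfold : List.foldl (groupBboxStepA bbox) (some []) group
      = List.foldl (groupBboxStepB bbox) (some []) group :=
    PySem.List.foldl_congr_mem group (groupBboxStepA bbox) (groupBboxStepB bbox) (some [])
      (fun acc s hs =>
        pvStep_eq bbox s (hpre s hs).1 (hpre s hs).2.1 (hpre s hs).2.2 acc)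
  rw [hfold]
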